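-- pv_equiv track=rewrite | github.com/hdssilva/MetaboCF | Databases/get_HMDB.py | generate_xml_chunks
-- ===== SOURCE A (Python) =====
-- def generate_xml_chunks(xmlfile):
--     reading = False
--     for line in xmlfile:
--         line=line.strip()
--         if not reading:
--             if not '<metabolite>' in line:
--                 continue
--             else:
--                 reading = True              #start reading chunk when beginning of metabolite is found
--                 chunk = []                  #list with lines for one chunk
--                 chunk.append(line)
--         else: # reading
--             if '</metabolite>' not in line: #append lines while end of chunk is not found
--                 chunk.append(line)
--             else:                           #return chunk when end is found
--                 reading = False
--                 chunk.append(line)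
--                 yield '\n'.join(chunk)
-- ===== SOURCE B (Python) =====
-- def generate_xml_chunks(xmlfile):
--     it = iter(xmlfile)
--     for line in it:
--         line = line.strip()
--         if '<metabolite>' not in line:
--             continue
--         chunk = [line]
--         for nxt in it:
--             nxt = nxt.strip()
--             chunk.append(nxt)
--             if '</metabolite>' in nxt:
--                 yield '\n'.join(chunk)
--                 break
-- ===== Notes on version B (the rewrite author's own statement) =====
-- stated objective: simpler
-- what changed: Replaces A's single loop with a boolean 'reading' flag and leftover chunk state by two nested loops over one shared iterator: an outer scan for '<metabolite>' and an inner collect-until-'</metabolite>' that yields on break, so no flag variable is needed.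
import Mathlib
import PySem

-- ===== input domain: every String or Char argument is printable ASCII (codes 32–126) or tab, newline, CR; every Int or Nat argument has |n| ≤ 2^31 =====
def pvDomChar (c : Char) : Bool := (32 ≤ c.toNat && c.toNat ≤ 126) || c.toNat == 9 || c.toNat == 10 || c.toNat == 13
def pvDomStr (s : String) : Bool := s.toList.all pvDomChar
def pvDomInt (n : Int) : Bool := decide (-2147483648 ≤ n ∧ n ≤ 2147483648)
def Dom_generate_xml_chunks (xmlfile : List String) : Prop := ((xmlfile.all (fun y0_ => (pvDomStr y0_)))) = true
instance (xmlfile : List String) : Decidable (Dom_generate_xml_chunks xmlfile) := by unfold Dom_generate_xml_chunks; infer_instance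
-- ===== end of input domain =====

-- B replaces A's boolean 'reading' flag by two nested loops over one shared iterator (simpler decomposition);
-- same return value everywhere (generators ported as the list of yielded values).

-- ===== PORT A =====
-- A's single loop with state (reading, chunk); yields collected in order.
def pvAGo (reading : Bool) (chunk : List String) : List String → List String
  | [] => []
  | l :: ls =>
    let line := PySem.Str.strip l
    if reading = false then
      if PySem.Str.isIn "<metabolite>" line = false then
        pvAGo false chunk ls
      else
        pvAGo true [line] ls
    else
      if PySem.Str.isIn "</metabolite>" line = false then
        pvAGo true (chunk ++ [line]) ls
      else
        PySem.Str.join "\n" (chunk ++ [line]) :: pvAGo false (chunk ++ [line]) ls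

def generate_xml_chunks (xmlfile : List String) : List String :=
  pvAGo false [] xmlfile

-- ===== PORT B =====
-- B's outer scan-for-start loop …
mutual
def pvBScan : List String → List String
  | [] => []
  | l :: ls =>
    let line := PySem.Str.strip l
    if PySem.Str.isIn "<metabolite>" line then pvBCollect [line] ls
    else pvBScan ls
-- … and inner collect-until-end loop sharing the same iterator (mutual recursion).
def pvBCollect (chunk : List String) : List String → List String
  | [] => []
  | l :: ls =>
    let line := PySem.Str.strip l
    if PySem.Str.isIn "</metabolite>" line then
      PySem.Str.join "\n" (chunk ++ [line]) :: pvBScan ls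
    else
      pvBCollect (chunk ++ [line]) ls
end

def generate_xml_chunks_alt (xmlfile : List String) : List String :=
  pvBScan xmlfile

-- ===== PRECONDITION & SPEC =====
def Spec_generate_xml_chunks (xmlfile : List String) (out : List String) : Prop := out = generate_xml_chunks_alt xmlfile
instance (xmlfile : List String) (out : List String) : Decidable (Spec_generate_xml_chunks xmlfile out) := by unfold Spec_generate_xml_chunks; infer_instance

-- ===== CLAIM (what is proved, stated in full; the proofs are below) =====
def Claim_equal_generate_xml_chunks : Prop := ∀ (xmlfile : List String), Dom_generate_xml_chunks xmlfile → Spec_generate_xml_chunks xmlfile (generate_xml_chunks xmlfile)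

-- ===== LEMMAS AND PROOFS =====
theorem pvAGo_eq (ls : List String) :
    (∀ chunk, pvAGo false chunk ls = pvBScan ls) ∧
    (∀ chunk, pvAGo true chunk ls = pvBCollect chunk ls) := by
  induction ls with
  | nil => exact ⟨fun _ => rfl, fun _ => rfl⟩
  | cons l ls ih =>
    constructor
    · intro chunk
      simp only [pvAGo, pvBScan]
      by_cases h : PySem.Str.isIn "<metabolite>" (PySem.Str.strip l) = true
      all_goals simp at h
      · simp [h, ih.2]
      · simp [h, ih.1]
    · intro chunk
      simp only [pvAGo, pvBCollect]
      by_cases h : PySem.Str.isIn "</metabolite>" (PySem.Str.strip l) = true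
      all_goals simp at h
      · simp [h, ih.1]
      · simp [h, ih.2]

-- ===== VERDICT (by name: the statement is the Claim_ definition above) =====
theorem generate_xml_chunks_spec : Claim_equal_generate_xml_chunks := by
  intro xmlfile _
  unfold Spec_generate_xml_chunks generate_xml_chunks generate_xml_chunks_alt
  exact (pvAGo_eq xmlfile).1 []
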